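-- pv_equiv track=rewrite | github.com/leonshting/another-fem-framework | interpolant/helpers.py | function_index
-- ===== SOURCE A (Python) =====
-- def function_index(orders):
--     index = []
--     for order_pack in orders:
--         index_pack = []
--         cnt = 0
--         for order in order_pack:
--             index_pack.append(list(range(cnt, cnt + order + 1)))
--             cnt += order
--         index.append(index_pack)
--     return index
-- ===== SOURCE B (Python) =====
-- def function_index(orders):
--     # start offset of element i is the sum of the orders before it (a prefix sum),
--     # so each range can be built independently instead of threading a running counter
--     return [
--         [list(range(sum(pack[:i]), sum(pack[:i]) + o + 1)) for i, o in enumerate(pack)]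
--         for pack in orders
--     ]
-- ===== Notes on version B (the rewrite author's own statement) =====
-- stated objective: simpler
-- what changed: replaces the running counter accumulator with an independent per-element prefix-sum (sum(pack[:i])) so each range is computed positionally inside a nested comprehension
import Mathlib
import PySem

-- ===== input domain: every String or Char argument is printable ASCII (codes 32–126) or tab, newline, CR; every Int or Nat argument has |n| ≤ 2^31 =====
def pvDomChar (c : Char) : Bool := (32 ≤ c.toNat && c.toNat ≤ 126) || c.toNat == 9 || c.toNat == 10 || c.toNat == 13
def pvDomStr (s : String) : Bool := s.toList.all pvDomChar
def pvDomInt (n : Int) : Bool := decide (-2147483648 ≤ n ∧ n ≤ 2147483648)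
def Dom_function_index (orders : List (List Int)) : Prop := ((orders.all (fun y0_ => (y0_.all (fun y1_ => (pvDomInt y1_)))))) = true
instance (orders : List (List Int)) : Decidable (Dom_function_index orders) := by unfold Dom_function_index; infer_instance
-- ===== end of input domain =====

-- B replaces A's running counter with an independent per-element prefix sum (simpler nested comprehension).

-- ===== PORT A =====
-- inner loop state: (index_pack, cnt)
def function_index (orders : List (List Int)) : List (List (List Int)) :=
  orders.foldl (fun index order_pack =>
    let r := order_pack.foldl
      (fun (st : List (List Int) × Int) order =>
        (st.1 ++ [PySem.List.pyRange st.2 (st.2 + order + 1) 1], st.2 + order))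
      ([], 0)
    index ++ [r.1]) []

-- ===== PORT B =====
-- 'for i, o in enumerate(pack)' is mapIdx; 'pack[:i]' with i ≥ 0 is exactly List.take i
def function_index_alt (orders : List (List Int)) : List (List (List Int)) :=
  orders.map (fun pack =>
    pack.mapIdx (fun i o =>
      PySem.List.pyRange ((pack.take i).sum) ((pack.take i).sum + o + 1) 1))

-- ===== PRECONDITION & SPEC =====
def Spec_function_index (orders : List (List Int)) (out : List (List (List Int))) : Prop := out = function_index_alt orders
instance (orders : List (List Int)) (out : List (List (List Int))) : Decidable (Spec_function_index orders out) := by unfold Spec_function_index; infer_instance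

-- ===== CLAIM (what is proved, stated in full; the proofs are below) =====
def Claim_equal_function_index : Prop := ∀ (orders : List (List Int)), Dom_function_index orders → Spec_function_index orders (function_index orders)

-- ===== LEMMAS AND PROOFS =====

-- A's inner loop on one pack equals B's prefix-sum comprehension, shifted by the start counter c.
theorem pack_loop (pack : List Int) (acc : List (List Int)) (c : Int) :
    pack.foldl
      (fun (st : List (List Int) × Int) order =>
        (st.1 ++ [PySem.List.pyRange st.2 (st.2 + order + 1) 1], st.2 + order))
      (acc, c)
    = (acc ++ pack.mapIdx (fun i o =>
         PySem.List.pyRange (c + (pack.take i).sum) (c + (pack.take i).sum + o + 1) 1),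
       c + pack.sum) := by
  induction pack generalizing acc c with
  | nil => simp
  | cons o rest ih =>
    simp only [List.foldl_cons, List.mapIdx_cons, List.take_succ_cons, List.sum_cons,
      List.take_zero, List.sum_nil, add_zero]
    rw [ih]
    simp only [List.append_assoc, List.singleton_append, add_assoc]

theorem function_index_spec : Claim_equal_function_index := by
  intro orders _
  unfold Spec_function_index function_index function_index_alt
  rw [PySem.List.foldl_append_singleton_eq_map]
  exact List.map_congr_left (fun pack _ => by
    rw [pack_loop pack [] 0]
    simp only [List.nil_append, zero_add])
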